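-- pv_equiv track=rewrite | github.com/jonsande/python_exercises | anagram.py | anagram_checker
-- ===== SOURCE A (Python) =====
-- def anagram_checker(text: str, sub_text: str) -> bool:
--     """
--     Check if a sentence is anagram of another
--     """
--
--     text = text.replace(" ", "")
--     text = text.lower()
--     sub_text = sub_text.replace(" ", "")
--     sub_text = sub_text.lower()
--
--     for i in text:
--         if i not in "abcdefghijklmnñopqrstuvwxyz":
--             text = text.replace(i, "")
--
--     for i in sub_text:
--         if i not in "abcdefghijklmnñopqrstuvwxyz":
--             sub_text = sub_text.replace(i, "")
--
--     dict_a = {}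
--     dict_b = {}
--
--     for i in set(text):
--         dict_a[i] = text.count(i)
--     for i in set(sub_text):
--         dict_b[i] = sub_text.count(i)
--
--     if dict_a == dict_b:
--         return True
--     else:
--         return False
-- ===== SOURCE B (Python) =====
-- ALPHABET = "abcdefghijklmnñopqrstuvwxyz"
--
-- def anagram_checker(text: str, sub_text: str) -> bool:
--     """Check if a sentence is an anagram of another: compare sorted filtered letters."""
--     def canon(s):
--         return sorted(c for c in s.lower() if c in ALPHABET)
--     return canon(text) == canon(sub_text)
-- ===== Notes on version B (the rewrite author's own statement) =====
-- stated objective: simpler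
-- what changed: Replaces A's char-removal passes plus per-unique-char count dictionaries compared for equality with a single canonical form: lowercase, filter to the allowed alphabet, sort, and compare the sorted lists.
import Mathlib
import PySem

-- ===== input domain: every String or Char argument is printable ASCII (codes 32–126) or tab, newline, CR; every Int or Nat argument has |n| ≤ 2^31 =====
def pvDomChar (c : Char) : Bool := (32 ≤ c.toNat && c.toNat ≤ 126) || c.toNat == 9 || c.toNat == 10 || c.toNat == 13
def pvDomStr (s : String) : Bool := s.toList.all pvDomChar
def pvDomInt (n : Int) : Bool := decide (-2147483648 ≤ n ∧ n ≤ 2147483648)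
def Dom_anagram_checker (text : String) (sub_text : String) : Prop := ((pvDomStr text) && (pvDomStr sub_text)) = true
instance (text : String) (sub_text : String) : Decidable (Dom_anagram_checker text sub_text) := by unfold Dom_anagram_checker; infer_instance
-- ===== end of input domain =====

-- B replaces A's char-removal passes and count-dictionary comparison by lowercase+filter+sort and
-- a comparison of the two sorted lists (objective: simpler).

-- the alphabet constant both Pythons share
def pvAlpha : List Char := "abcdefghijklmnñopqrstuvwxyz".toList

-- ===== PORT A =====
def anagram_checker (text : String) (sub_text : String) : Bool :=
  -- text = text.replace(" ", ""); text = text.lower()  (same for sub_text)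
  let t0 : List Char := PySem.Chars.lower (PySem.Chars.replace text.toList [' '] [])
  let s0 : List Char := PySem.Chars.lower (PySem.Chars.replace sub_text.toList [' '] [])
  -- for i in text: if i not in alphabet: text = text.replace(i, "")   (loop iterates the original string)
  let t1 : List Char := t0.foldl (fun cur i =>
    if ¬ (PySem.Chars.isIn [i] pvAlpha) then PySem.Chars.replace cur [i] [] else cur) t0
  let s1 : List Char := s0.foldl (fun cur i =>
    if ¬ (PySem.Chars.isIn [i] pvAlpha) then PySem.Chars.replace cur [i] [] else cur) s0
  -- for i in set(text): dict_a[i] = text.count(i)   (same for dict_b)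
  let dict_a : PySem.Dict Char Int := (PySem.Set.ofList t1).foldl
    (fun d i => d.insert i ((PySem.Chars.count t1 [i] : Int))) PySem.Dict.empty
  let dict_b : PySem.Dict Char Int := (PySem.Set.ofList s1).foldl
    (fun d i => d.insert i ((PySem.Chars.count s1 [i] : Int))) PySem.Dict.empty
  -- if dict_a == dict_b: return True else: return False   (Python dict == ignores insertion order)
  if PySem.Set.equal dict_a.keys dict_b.keys
      && dict_a.keys.all (fun k => dict_a.get? k == dict_b.get? k) then true else false

-- ===== PORT B =====
-- canon(s): sorted(c for c in s.lower() if c in ALPHABET)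
def pvCanon (s : List Char) : List Char :=
  PySem.List.sorted ((PySem.Chars.lower s).filter (fun c => PySem.Chars.isIn [c] pvAlpha))
    (fun x => x) false

def anagram_checker_alt (text : String) (sub_text : String) : Bool :=
  pvCanon text.toList == pvCanon sub_text.toList

-- ===== PRECONDITION & SPEC =====
def Spec_anagram_checker (text : String) (sub_text : String) (out : Bool) : Prop := out = anagram_checker_alt text sub_text
instance (text : String) (sub_text : String) (out : Bool) : Decidable (Spec_anagram_checker text sub_text out) := by unfold Spec_anagram_checker; infer_instance

-- ===== CLAIM (what is proved, stated in full; the proofs are below) =====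
def Claim_equal_anagram_checker : Prop := ∀ (text : String) (sub_text : String), Dom_anagram_checker text sub_text → Spec_anagram_checker text sub_text (anagram_checker text sub_text)

-- ===== LEMMAS AND PROOFS =====

-- the dictionary A builds from a filtered string (proof-only abbreviation; definitionally A's foldl)
def pvDict (t : List Char) : PySem.Dict Char Int :=
  (PySem.Set.ofList t).foldl (fun d i => d.insert i ((PySem.Chars.count t [i] : Int))) PySem.Dict.empty

theorem pv_dict_def (t : List Char) :
    (PySem.Set.ofList t).foldl (fun d i => d.insert i ((PySem.Chars.count t [i] : Int))) PySem.Dict.empty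
      = pvDict t := rfl

-- str.replace(c, "") with a single-char pattern deletes exactly the occurrences of c
theorem pv_replace_go_singleton (c : Char) : ∀ (fuel : Nat) (l acc : List Char),
    l.length ≤ fuel →
    PySem.Chars.replace.go [c] [] fuel l acc = acc.reverse ++ l.filter (· != c) := by
  intro fuel
  induction fuel with
  | zero => intro l acc h; cases l with
    | nil => simp [PySem.Chars.replace.go]
    | cons x t => simp at h
  | succ n ih =>
    intro l acc h
    cases l with
    | nil => simp [PySem.Chars.replace.go]
    | cons x t =>
      simp only [PySem.Chars.replace.go]
      by_cases hx : x = c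
      · subst hx
        have hpre : ([x].isPrefixOf (x :: t)) = true := by simp [List.isPrefixOf]
        rw [if_pos hpre]
        rw [ih _ _ (by simpa using Nat.le_of_succ_le_succ h)]
        simp
      · have hpre : ([c].isPrefixOf (x :: t)) = false := by
          simp only [List.isPrefixOf, Bool.and_eq_false_iff, beq_eq_false_iff_ne]
          exact Or.inl (Ne.symm hx)
        rw [if_neg (by simp [hpre])]
        rw [ih _ _ (by simpa using Nat.le_of_succ_le_succ h)]
        simp [hx]

theorem pv_replace_singleton (s : List Char) (c : Char) :
    PySem.Chars.replace s [c] [] = s.filter (· != c) := by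
  simpa using pv_replace_go_singleton c s.length s [] le_rfl

-- str.count(c) with a single-char pattern is the character count
theorem pv_count_go_singleton (c : Char) : ∀ (fuel : Nat) (l : List Char) (acc : Nat),
    l.length ≤ fuel →
    PySem.Chars.count.go [c] fuel l acc = acc + l.count c := by
  intro fuel
  induction fuel with
  | zero => intro l acc h; cases l with
    | nil => simp [PySem.Chars.count.go]
    | cons x t => simp at h
  | succ n ih =>
    intro l acc h
    cases l with
    | nil => simp [PySem.Chars.count.go]
    | cons x t =>
      simp only [PySem.Chars.count.go]
      by_cases hx : x = c
      · subst hx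
        have hpre : ([x].isPrefixOf (x :: t)) = true := by simp [List.isPrefixOf]
        rw [if_pos hpre]
        rw [ih _ _ (by simpa using Nat.le_of_succ_le_succ h)]
        simp
        omega
      · have hpre : ([c].isPrefixOf (x :: t)) = false := by
          simp only [List.isPrefixOf, Bool.and_eq_false_iff, beq_eq_false_iff_ne]
          exact Or.inl (Ne.symm hx)
        rw [if_neg (by simp [hpre])]
        rw [ih _ _ (by simpa using Nat.le_of_succ_le_succ h)]
        simp [hx]

theorem pv_count_singleton (s : List Char) (c : Char) :
    PySem.Chars.count s [c] = s.count c := by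
  simpa [PySem.Chars.count] using pv_count_go_singleton c s.length s 0 le_rfl

-- the alphabet-membership test both programs perform
def pvP (c : Char) : Bool := PySem.Chars.isIn [c] pvAlpha

-- A's removal loop over ys, started from any state s
theorem pv_removal_fold (ys : List Char) : ∀ (s : List Char),
    ys.foldl (fun cur i => if ¬ (PySem.Chars.isIn [i] pvAlpha) then PySem.Chars.replace cur [i] [] else cur) s
      = s.filter (fun c => pvP c || !(ys.contains c)) := by
  induction ys with
  | nil => intro s; simp
  | cons i t ih =>
    intro s
    simp only [List.foldl_cons]
    by_cases hp : pvP i = true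
    · rw [if_neg (by simp [pvP] at hp ⊢; exact hp)]
      rw [ih s]
      apply List.filter_congr
      intro c _
      by_cases hc : c = i
      · subst hc; simp [hp]
      · simp [hc]
    · rw [if_pos (by simp [pvP] at hp ⊢; exact hp)]
      rw [pv_replace_singleton, ih]
      rw [List.filter_filter]
      apply List.filter_congr
      intro c _
      by_cases hc : c = i
      · subst hc
        simp [hp]
      · simp [hc]

-- started from ys itself it is exactly the alphabet filter
theorem pv_removal_fold_self (ys : List Char) :
    ys.foldl (fun cur i => if ¬ (PySem.Chars.isIn [i] pvAlpha) then PySem.Chars.replace cur [i] [] else cur) ys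
      = ys.filter pvP := by
  rw [pv_removal_fold]
  apply List.filter_congr
  intro c hc
  simp [hc]

-- lowercasing does not create letters out of spaces: removing spaces first changes nothing
theorem pv_lower_despace (xs : List Char) :
    (PySem.Chars.lower (xs.filter (· != ' '))).filter pvP
      = (PySem.Chars.lower xs).filter pvP := by
  simp only [PySem.Chars.lower, List.filter_map]
  congr 1
  rw [List.filter_filter]
  apply List.filter_congr
  intro c _
  by_cases hc : c = ' '
  · subst hc; simp [Function.comp, pvP]; decide
  · simp [hc]

-- A's filtered string equals B's filtered string
theorem pv_filtered_eq (s : String) :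
    (PySem.Chars.lower (PySem.Chars.replace s.toList [' '] [])).foldl
        (fun cur i => if ¬ (PySem.Chars.isIn [i] pvAlpha) then PySem.Chars.replace cur [i] [] else cur)
        (PySem.Chars.lower (PySem.Chars.replace s.toList [' '] []))
      = (PySem.Chars.lower s.toList).filter (fun c => PySem.Chars.isIn [c] pvAlpha) := by
  rw [pv_removal_fold_self, pv_replace_singleton, pv_lower_despace]
  rfl

-- the keys of A's count dictionary
theorem pv_dict_keys (t : List Char) : (pvDict t).keys = PySem.Set.ofList t := by
  have hfresh : ∀ a ∈ PySem.Set.ofList t, (PySem.Dict.empty : PySem.Dict Char Int).contains a = false := by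
    intro a _; simp [PySem.Dict.contains_empty]
  have hnd : ((PySem.Set.ofList t).map id).Nodup := by
    simpa using PySem.Set.nodup_ofList t
  have hitems : (pvDict t).items
      = (PySem.Set.ofList t).map (fun a => (a, ((PySem.Chars.count t [a] : Int)))) := by
    simpa using PySem.Dict.items_foldl_insert_fresh
      (l := PySem.Set.ofList t) (k := id) (v := fun i => ((PySem.Chars.count t [i] : Int)))
      (d := PySem.Dict.empty) hfresh hnd
  show (pvDict t).items.map (·.1) = _
  rw [hitems]; simp [Function.comp_def]

-- A's count dictionary: lookup characterisation
theorem pv_dict_get? (t : List Char) (c : Char) :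
    (pvDict t).get? c = if c ∈ t then some ((t.count c : Int)) else none := by
  have hfresh : ∀ a ∈ PySem.Set.ofList t, (PySem.Dict.empty : PySem.Dict Char Int).contains a = false := by
    intro a _; simp [PySem.Dict.contains_empty]
  have hnd : ((PySem.Set.ofList t).map id).Nodup := by
    simpa using PySem.Set.nodup_ofList t
  have hitems : (pvDict t).items
      = (PySem.Set.ofList t).map (fun a => (a, ((PySem.Chars.count t [a] : Int)))) := by
    simpa using PySem.Dict.items_foldl_insert_fresh
      (l := PySem.Set.ofList t) (k := id) (v := fun i => ((PySem.Chars.count t [i] : Int)))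
      (d := PySem.Dict.empty) hfresh hnd
  have hndk : (pvDict t).keys.Nodup := by
    rw [pv_dict_keys]; exact PySem.Set.nodup_ofList t
  by_cases hc : c ∈ t
  · have hmem : (c, ((t.count c : Int))) ∈ (pvDict t).items := by
      rw [hitems]
      exact List.mem_map.mpr ⟨c, (PySem.Set.mem_ofList _ _).mpr hc, by simp [pv_count_singleton]⟩
    rw [if_pos hc]
    exact PySem.Dict.get?_of_mem_items _ hmem hndk
  · rw [if_neg hc]
    apply (PySem.Dict.get?_eq_none_iff_not_mem_keys (pvDict t) c).mpr
    rw [pv_dict_keys]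
    simpa [PySem.Set.mem_ofList] using hc

-- A's dict comparison is counting equality
theorem pv_dict_eq_iff (t s : List Char) :
    (PySem.Set.equal (pvDict t).keys (pvDict s).keys
      && (pvDict t).keys.all (fun k => (pvDict t).get? k == (pvDict s).get? k)) = true
      ↔ (∀ c : Char, t.count c = s.count c) := by
  rw [Bool.and_eq_true, PySem.Set.equal_iff, List.all_eq_true]
  constructor
  · rintro ⟨hkeys, hall⟩ c
    by_cases hct : c ∈ t
    · have hcA : c ∈ (pvDict t).keys := by
        rw [pv_dict_keys]; exact (PySem.Set.mem_ofList _ _).mpr hct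
      have hcs : c ∈ s := by
        have := (hkeys c).mp hcA
        rw [pv_dict_keys] at this
        exact (PySem.Set.mem_ofList _ _).mp this
      have := hall c hcA
      rw [pv_dict_get?, pv_dict_get?, if_pos hct, if_pos hcs] at this
      simpa using this
    · have hcs : c ∉ s := by
        intro hcs
        have hcB : c ∈ (pvDict s).keys := by
          rw [pv_dict_keys]; exact (PySem.Set.mem_ofList _ _).mpr hcs
        have hcA := (hkeys c).mpr hcB
        rw [pv_dict_keys] at hcA
        exact hct ((PySem.Set.mem_ofList _ _).mp hcA)
      rw [List.count_eq_zero_of_not_mem hct, List.count_eq_zero_of_not_mem hcs]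
  · intro h
    have hmem : ∀ c : Char, c ∈ t ↔ c ∈ s := by
      intro c
      rw [← List.count_pos_iff, ← List.count_pos_iff, h c]
    refine ⟨fun c => ?_, fun c hcA => ?_⟩
    · rw [pv_dict_keys, pv_dict_keys, PySem.Set.mem_ofList, PySem.Set.mem_ofList]
      exact hmem c
    · have hct : c ∈ t := by
        rw [pv_dict_keys] at hcA; exact (PySem.Set.mem_ofList _ _).mp hcA
      rw [pv_dict_get?, pv_dict_get?, if_pos hct, if_pos ((hmem c).mp hct), h c]
      simp

-- ===== VERDICT (by name: the statement is the Claim_ definition above) =====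
theorem anagram_checker_spec : Claim_equal_anagram_checker := by
  intro text sub_text _
  show anagram_checker text sub_text = anagram_checker_alt text sub_text
  unfold anagram_checker anagram_checker_alt pvCanon
  simp only [pv_filtered_eq]
  rw [pv_dict_def, pv_dict_def]
  set ft := (PySem.Chars.lower text.toList).filter (fun c => PySem.Chars.isIn [c] pvAlpha) with hft
  set fs := (PySem.Chars.lower sub_text.toList).filter (fun c => PySem.Chars.isIn [c] pvAlpha) with hfs
  by_cases h : ∀ c : Char, ft.count c = fs.count c
  · rw [if_pos ((pv_dict_eq_iff ft fs).mpr h)]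
    have hsort : PySem.List.sorted ft (fun x => x) false = PySem.List.sorted fs (fun x => x) false :=
      (PySem.List.sorted_id_eq_sorted_id_iff_perm (xs := ft) (ys := fs)).mpr ((List.perm_iff_count).mpr h)
    simp [hsort]
  · rw [if_neg (fun hc => h ((pv_dict_eq_iff ft fs).mp hc))]
    have hsort : PySem.List.sorted ft (fun x => x) false ≠ PySem.List.sorted fs (fun x => x) false :=
      fun he => h fun c =>
        (List.perm_iff_count).mp ((PySem.List.sorted_id_eq_sorted_id_iff_perm (xs := ft) (ys := fs)).mp he) c
    simp [hsort]
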